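-- pv_equiv track=rewrite | github.com/daniel-reich/ubiquitous-fiesta | Ygt4LGupxDAqXNrhS_9.py | spotlight_map
-- ===== SOURCE A (Python) =====
-- def sum_sur(x,y, G):
--   B=[]
--   for k in range(len(G)):
--     for l in range(len(G[0])):
--       if abs(x-k)<2 and abs(y-l)<2:
--         B.append(G[k][l])
--   return B
--
-- def spotlight_map(grid):
--   if grid==[[]]:
--     return [[]]
--   elif grid==[]:
--     return []
--   else:
--     m=len(grid)
--     n=len(grid[0])
--     C=[]
--     for i in range(m):
--       for j in range(n):
--         C.append(sum(sum_sur(i,j, grid)))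
--     return [C[i:i+n] for i in range(0,len(C),n)]
-- ===== SOURCE B (Python) =====
-- def spotlight_map(grid):
--     m = len(grid)
--     if m == 0:
--         return []
--     n = len(grid[0])
--     out = []
--     for i in range(m):
--         row = []
--         for j in range(n):
--             s = 0
--             for k in range(max(0, i - 1), min(m, i + 2)):
--                 for l in range(max(0, j - 1), min(n, j + 2)):
--                     s += grid[k][l]
--             row.append(s)
--         out.append(row)
--     return out
-- ===== Notes on version B (the rewrite author's own statement) =====
-- stated objective: faster
-- what changed: A calls sum_sur for every cell, which scans the whole m*n grid to collect neighbours, then flattens and re-slices; B sums the at most 9 adjacent cells directly via clipped index ranges, building the output row by row.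
import Mathlib
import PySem

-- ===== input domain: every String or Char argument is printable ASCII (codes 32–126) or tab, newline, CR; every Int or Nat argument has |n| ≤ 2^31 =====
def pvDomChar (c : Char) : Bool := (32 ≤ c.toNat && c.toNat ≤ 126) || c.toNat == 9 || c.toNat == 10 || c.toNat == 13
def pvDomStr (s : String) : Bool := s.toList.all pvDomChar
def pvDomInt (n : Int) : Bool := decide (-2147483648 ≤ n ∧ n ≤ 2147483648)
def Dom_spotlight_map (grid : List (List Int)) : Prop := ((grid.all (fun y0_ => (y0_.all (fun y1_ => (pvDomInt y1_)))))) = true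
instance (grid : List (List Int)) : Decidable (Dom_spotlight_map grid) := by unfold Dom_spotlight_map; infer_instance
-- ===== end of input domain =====

-- B replaces A's per-cell whole-grid scan + flatten-and-reslice by a direct sum of the ≤9 adjacent
-- cells per cell (clipped index ranges), building the output row by row: an asymptotically faster algorithm.


-- ===== PORT A =====
def sum_sur (x y : Int) (G : List (List Int)) : List Int :=
  (PySem.List.pyRange 0 (PySem.List.len G) 1).foldl (fun B k =>
    (PySem.List.pyRange 0 (PySem.List.len (PySem.List.pyGetD G 0 [])) 1).foldl (fun B l =>
      if |x - k| < 2 ∧ |y - l| < 2 then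
        B ++ [PySem.List.pyGetD (PySem.List.pyGetD G k []) l 0]
      else B) B) []

def spotlight_map (grid : List (List Int)) : List (List Int) :=
  if grid = [[]] then [[]]
  else if grid = [] then []
  else
    let m := PySem.List.len grid
    let n := PySem.List.len (PySem.List.pyGetD grid 0 [])
    let C := (PySem.List.pyRange 0 m 1).foldl (fun C i =>
      (PySem.List.pyRange 0 n 1).foldl (fun C j =>
        C ++ [(sum_sur i j grid).foldl (fun acc v => acc + v) 0]) C) []
    (PySem.List.pyRange 0 (PySem.List.len C) n).map
      (fun i => PySem.List.slice C (some i) (some (i + n)))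

-- ===== PORT B =====
def spotlight_map_alt (grid : List (List Int)) : List (List Int) :=
  let m := PySem.List.len grid
  if m = 0 then []
  else
    let n := PySem.List.len (PySem.List.pyGetD grid 0 [])
    (PySem.List.pyRange 0 m 1).foldl (fun out i =>
      out ++ [(PySem.List.pyRange 0 n 1).foldl (fun row j =>
        row ++ [(PySem.List.pyRange (max 0 (i - 1)) (min m (i + 2)) 1).foldl (fun s k =>
          (PySem.List.pyRange (max 0 (j - 1)) (min n (j + 2)) 1).foldl (fun s l =>
            s + PySem.List.pyGetD (PySem.List.pyGetD grid k []) l 0) s) 0]) []]) []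

-- ===== PRECONDITION & SPEC =====
-- Pre_ excludes exactly the inputs on which A raises: grids of ≥ 2 rows whose first row is empty
-- (ValueError: range() step 0) and ragged grids with a row shorter than the first row (IndexError).
def Pre_spotlight_map (grid : List (List Int)) : Prop :=
  grid = [] ∨ grid = [[]] ∨
    (0 < (grid.headD []).length ∧ ∀ row ∈ grid, (grid.headD []).length ≤ row.length)
instance (grid : List (List Int)) : Decidable (Pre_spotlight_map grid) := by
  unfold Pre_spotlight_map; infer_instance

def pvWitness_spotlight_map : List (List Int) := [[1, 2], [3, 4]]

def Spec_spotlight_map (grid : List (List Int)) (out : List (List Int)) : Prop :=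
  out = spotlight_map_alt grid
instance (grid : List (List Int)) (out : List (List Int)) : Decidable (Spec_spotlight_map grid out) := by
  unfold Spec_spotlight_map; infer_instance

-- ===== CLAIM (what is proved, stated in full; the proofs are below) =====
def Claim_equal_spotlight_map : Prop := ∀ (grid : List (List Int)),
  Dom_spotlight_map grid → Pre_spotlight_map grid →
    Spec_spotlight_map grid (spotlight_map grid)

-- ===== LEMMAS AND PROOFS =====

theorem sum_map_ite_filter {α : Type} (p : α → Prop) [DecidablePred p] (f : α → Int) (l : List α) :
    (l.map (fun x => if p x then f x else 0)).sum = ((l.filter (fun x => decide (p x))).map f).sum := by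
  induction l with
  | nil => simp
  | cons a t ih => by_cases h : p a <;> simp [h, ih]

theorem range_filter_near (c N : Int) (h0 : 0 ≤ c) (hc : c < N) :
    (PySem.List.pyRange 0 N 1).filter (fun x => decide (|c - x| < 2)) =
      PySem.List.pyRange (max 0 (c - 1)) (min N (c + 2)) 1 := by
  rw [PySem.List.pyRange_one_append 0 (max 0 (c - 1)) N (by omega) (by omega),
      PySem.List.pyRange_one_append (max 0 (c - 1)) (min N (c + 2)) N (by omega) (by omega),
      List.filter_append, List.filter_append]
  rw [List.filter_eq_nil_iff.mpr (by
        intro x hx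
        rw [PySem.List.mem_pyRange_one] at hx
        simp only [decide_eq_true_eq, abs_lt]
        omega)]
  rw [List.filter_eq_self.mpr (by
        intro x hx
        rw [PySem.List.mem_pyRange_one] at hx
        simp only [decide_eq_true_eq, abs_lt]
        omega)]
  rw [List.filter_eq_nil_iff.mpr (by
        intro x hx
        rw [PySem.List.mem_pyRange_one] at hx
        simp only [decide_eq_true_eq, abs_lt]
        omega)]
  simp

theorem sum_sur_eq (x y : Int) (G : List (List Int)) :
    sum_sur x y G = (PySem.List.pyRange 0 (G.length : Int) 1).flatMap (fun k =>
      ((PySem.List.pyRange 0 ((PySem.List.pyGetD G 0 []).length : Int) 1).filter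
          (fun l => decide (|x - k| < 2 ∧ |y - l| < 2))).map
        (fun l => PySem.List.pyGetD (PySem.List.pyGetD G k []) l 0)) := by
  unfold sum_sur
  simp only [PySem.List.len_eq, PySem.List.foldl_append_ite,
    PySem.List.foldl_append_eq_flatMap, List.nil_append]

theorem cell_eq (grid : List (List Int)) (i j : Int)
    (hi0 : 0 ≤ i) (him : i < (grid.length : Int))
    (hj0 : 0 ≤ j) (hjn : j < ((PySem.List.pyGetD grid 0 []).length : Int)) :
    (sum_sur i j grid).foldl (fun acc v => acc + v) 0 =
    (PySem.List.pyRange (max 0 (i - 1)) (min (grid.length : Int) (i + 2)) 1).foldl (fun s k =>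
      (PySem.List.pyRange (max 0 (j - 1)) (min ((PySem.List.pyGetD grid 0 []).length : Int) (j + 2)) 1).foldl
        (fun s l => s + PySem.List.pyGetD (PySem.List.pyGetD grid k []) l 0) s) 0 := by
  simp only [PySem.List.foldl_add, zero_add]
  rw [PySem.List.foldl_add (sum_sur i j grid) (fun v => v) 0]
  simp only [List.map_id', zero_add]
  rw [sum_sur_eq, List.flatMap_def, List.sum_flatten, List.map_map]
  have step1 : ∀ k ∈ PySem.List.pyRange 0 (grid.length : Int) 1,
      (List.sum ∘ fun k =>
        List.map (fun l => PySem.List.pyGetD (PySem.List.pyGetD grid k []) l 0)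
          ((PySem.List.pyRange 0 ((PySem.List.pyGetD grid 0 []).length : Int) 1).filter
            (fun l => decide (|i - k| < 2 ∧ |j - l| < 2)))) k
      = (fun k => if |i - k| < 2 then
          (((PySem.List.pyRange 0 ((PySem.List.pyGetD grid 0 []).length : Int) 1).filter
              (fun l => decide (|j - l| < 2))).map
            (fun l => PySem.List.pyGetD (PySem.List.pyGetD grid k []) l 0)).sum else 0) k := by
    intro k _
    by_cases h : |i - k| < 2
    · have h1 : |i - k| ≤ 1 := by omega
      simp [h, h1]
    · have h1 : ¬ |i - k| ≤ 1 := by omega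
      simp [h, h1]
  rw [List.map_congr_left step1, sum_map_ite_filter,
      range_filter_near i (grid.length : Int) hi0 him,
      range_filter_near j ((PySem.List.pyGetD grid 0 []).length : Int) hj0 hjn]

theorem chunk_core (n : Nat) (R : List (List Int)) (hlen : ∀ r ∈ R, r.length = n) :
    (List.range R.length).map (fun k => (R.flatten.drop (k * n)).take n) = R := by
  induction R with
  | nil => simp
  | cons r t ih =>
    have hr : r.length = n := hlen r (by simp)
    simp only [List.length_cons, List.range_succ_eq_map, List.map_cons, List.map_map,
      List.flatten_cons, List.cons_eq_cons]
    constructor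
    · simp [List.take_left' hr]
    · rw [show (fun k => (((r ++ t.flatten).drop (k * n)).take n)) ∘ Nat.succ
            = fun k => ((t.flatten.drop (k * n)).take n) from ?_]
      · exact ih (fun r hr' => hlen r (by simp [hr']))
      · funext k
        simp only [Function.comp_apply, Nat.succ_eq_add_one]
        rw [List.drop_append]
        have h1 : (k + 1) * n - r.length = k * n := by rw [hr]; ring_nf; omega
        have h2 : (r.drop ((k+1) * n)) = [] := by
          apply List.drop_eq_nil_of_le; rw [hr]; nlinarith
        rw [h1, h2, List.nil_append]

theorem chunk (n : Nat) (hn : 0 < n) (R : List (List Int)) (hlen : ∀ r ∈ R, r.length = n) :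
    (PySem.List.pyRange 0 (R.flatten.length : Int) (n : Int)).map
      (fun i => PySem.List.slice R.flatten (some i) (some (i + (n : Int)))) = R := by
  have hflen : R.flatten.length = R.length * n := by
    rw [List.length_flatten, List.map_congr_left (fun r hr => hlen r hr)]
    simp [List.map_const', mul_comm]
  have hcount : PySem.List.pyRange 0 (R.flatten.length : Int) (n : Int)
      = (List.range R.length).map (fun k => ((k * n : Nat) : Int)) := by
    rw [PySem.List.pyRange_of_pos _ _ (by exact_mod_cast hn)]
    have hK : (if (0:Int) < (R.flatten.length : Int) then
        (((R.flatten.length : Int) - 0 + n - 1) / n).toNat else 0) = R.length := by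
      rw [hflen]
      by_cases h0 : R.length = 0
      · simp [h0]
      · rw [if_pos (by push_cast; positivity)]
        have : ((R.length * n : Nat) : Int) - 0 + (n : Int) - 1
            = ((n : Int) - 1) + (R.length : Int) * (n : Int) := by push_cast; ring
        rw [this, Int.add_mul_ediv_right _ _ (by exact_mod_cast hn.ne'),
          Int.ediv_eq_zero_of_lt (by omega) (by omega)]
        simp
    rw [hK]
    apply List.map_congr_left
    intro k _
    push_cast
    ring
  rw [hcount, List.map_map]
  rw [show ((fun i => PySem.List.slice R.flatten (some i) (some (i + (n:Int)))) ∘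
        (fun k : Nat => ((k * n : Nat) : Int)))
      = fun k : Nat => (R.flatten.drop (k * n)).take n from ?_]
  · exact chunk_core n R hlen
  · funext k
    simp only [Function.comp_apply]
    rw [show ((k * n : Nat) : Int) + (n : Int) = (((k * n + n : Nat)) : Int) by push_cast; ring]
    rw [show (((k * n + n : Nat)) : Int) = ((k*n : Nat) : Int) + ((n : Nat) : Int) by push_cast; ring]
    exact PySem.List.slice_natCast_add _ _ _

theorem spotlight_map_main (grid : List (List Int)) (h : Pre_spotlight_map grid) :
    spotlight_map grid = spotlight_map_alt grid := by
  rcases h with h | h | ⟨hn, _hrows⟩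
  · subst h; decide
  · subst h; decide
  · have hne1 : grid ≠ [] := by rintro rfl; simp at hn
    have hne2 : grid ≠ [[]] := by rintro rfl; simp at hn
    rw [spotlight_map, spotlight_map_alt, if_neg hne2, if_neg hne1]
    simp only [PySem.List.len_eq]
    rw [if_neg (by exact_mod_cast fun h => hne1 (List.length_eq_zero_iff.mp (by exact_mod_cast h)))]
    simp only [PySem.List.foldl_append_singleton_eq_map, PySem.List.foldl_append_eq_flatMap,
      List.nil_append]
    have hn' : 0 < (PySem.List.pyGetD grid 0 []).length := by
      cases grid with
      | nil => exact absurd rfl hne1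
      | cons r t => simpa [PySem.List.pyGetD_zero_cons] using hn
    rw [List.flatMap_def]
    rw [chunk (PySem.List.pyGetD grid 0 []).length hn' _
      (by intro r hr
          simp only [List.mem_map] at hr
          obtain ⟨i, _, rfl⟩ := hr
          simp [PySem.List.length_pyRange_one])]
    apply List.map_congr_left
    intro i hi
    apply List.map_congr_left
    intro j hj
    rw [PySem.List.mem_pyRange_one] at hi hj
    exact cell_eq grid i j hi.1 hi.2 hj.1 hj.2

-- ===== VERDICT (by name: the statement is the Claim_ definition above) =====
theorem spotlight_map_spec : Claim_equal_spotlight_map := by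
  intro grid _ hpre
  unfold Spec_spotlight_map
  exact spotlight_map_main grid hpre
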